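-- pv_equiv track=rewrite | github.com/aarbys/EGE-TRAINER | twenty_five.py | between_some_some_solution
-- ===== SOURCE A (Python) =====
-- def between_some_some_solution(number_one, number_two,amount_dividers):
--     answer = []
--     for i in range(number_one, number_two + 1):
--         a = []
--         for j in range(2, i // 2 + 1):
--             if i % j == 0 and len(a) <= amount_dividers:
--                 a.append(j)
--             elif len(a) > amount_dividers:
--                 break
--         if len(a) == amount_dividers:
--             answer.append(a)
--     if len(answer)==0:
--         answer=[[-1,-1]]
--     return answer
-- ===== SOURCE B (Python) =====
-- def between_some_some_solution(number_one, number_two, amount_dividers):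
--     if amount_dividers < 0:
--         return [[-1, -1]]  # no number has a negative count of divisors
--     answer = []
--     for i in range(number_one, number_two + 1):
--         small, large = [], []
--         d = 2
--         while d * d <= i:
--             if i % d == 0:
--                 small.append(d)
--                 q = i // d
--                 if q != d:
--                     large.append(q)
--             d += 1
--         divs = small + large[::-1]
--         if len(divs) == amount_dividers:
--             answer.append(divs)
--     return answer if answer else [[-1, -1]]
-- ===== Notes on version B (the rewrite author's own statement) =====
-- stated objective: alternative
-- what changed: Per number, B collects divisor pairs (d, i//d) by trial division only up to sqrt(i) and concatenates the reversed large half, instead of A's truncating scan of every candidate from 2 to i//2.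
import Mathlib
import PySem

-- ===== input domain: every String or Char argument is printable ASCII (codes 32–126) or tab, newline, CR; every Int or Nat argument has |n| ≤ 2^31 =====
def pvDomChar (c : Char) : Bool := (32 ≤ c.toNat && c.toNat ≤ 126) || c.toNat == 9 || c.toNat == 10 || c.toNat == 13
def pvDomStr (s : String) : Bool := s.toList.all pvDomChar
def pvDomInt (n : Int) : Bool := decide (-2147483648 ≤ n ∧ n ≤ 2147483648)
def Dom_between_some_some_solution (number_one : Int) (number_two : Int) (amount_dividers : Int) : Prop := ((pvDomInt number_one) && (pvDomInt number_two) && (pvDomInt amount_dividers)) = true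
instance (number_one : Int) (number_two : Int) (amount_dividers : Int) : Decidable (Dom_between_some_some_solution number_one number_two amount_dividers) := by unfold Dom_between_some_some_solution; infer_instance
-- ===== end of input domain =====

-- B replaces A's per-number scan of all candidates up to i//2 by paired divisor collection up to sqrt(i); same return values.
-- ===== PORT A =====
def pvInnerA (i : Int) (amount : Int) (j : Int) (a : List Int) : List Int :=
  if _h : j < PySem.Int.floordiv i 2 + 1 then
    if PySem.Int.mod i j = 0 ∧ (a.length : Int) ≤ amount then
      pvInnerA i amount (j + 1) (a ++ [j])
    else if (a.length : Int) > amount then a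
    else pvInnerA i amount (j + 1) a
  else a
termination_by (PySem.Int.floordiv i 2 + 1 - j).toNat
decreasing_by all_goals omega

def between_some_some_solution (number_one : Int) (number_two : Int) (amount_dividers : Int) : List (List Int) :=
  let answer := (PySem.List.pyRange number_one (number_two + 1) 1).foldl
    (fun answer i =>
      let a := pvInnerA i amount_dividers 2 []
      if (a.length : Int) = amount_dividers then answer ++ [a] else answer) []
  if answer.length = 0 then [[-1, -1]] else answer

-- ===== PORT B =====
def pvCollect (i : Int) (d : Int) : List Int × List Int :=
  if h : d * d ≤ i then
    let rest := pvCollect i (d + 1)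
    if PySem.Int.mod i d = 0 then
      let q := PySem.Int.floordiv i d
      (d :: rest.1, if q ≠ d then q :: rest.2 else rest.2)
    else rest
  else ([], [])
termination_by (i + 2 - d).toNat
decreasing_by
  have h4 : 4 * i ≥ 4 * d - 1 := by nlinarith [sq_nonneg (2 * d - 1)]
  omega

def between_some_some_solution_alt (number_one : Int) (number_two : Int) (amount_dividers : Int) : List (List Int) :=
  if amount_dividers < 0 then [[-1, -1]]  -- no number has a negative count of divisors
  else
  let answer := (PySem.List.pyRange number_one (number_two + 1) 1).foldl
    (fun answer i =>
      let sl := pvCollect i 2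
      let divs := sl.1 ++ sl.2.reverse
      if (divs.length : Int) = amount_dividers then answer ++ [divs] else answer) []
  if answer.length = 0 then [[-1, -1]] else answer

-- ===== PRECONDITION & SPEC =====
def Spec_between_some_some_solution (number_one : Int) (number_two : Int) (amount_dividers : Int) (out : List (List Int)) : Prop := out = between_some_some_solution_alt number_one number_two amount_dividers
instance (number_one : Int) (number_two : Int) (amount_dividers : Int) (out : List (List Int)) : Decidable (Spec_between_some_some_solution number_one number_two amount_dividers out) := by unfold Spec_between_some_some_solution; infer_instance

-- ===== CLAIM (what is proved, stated in full; the proofs are below) =====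
def Claim_equal_between_some_some_solution : Prop := ∀ (number_one : Int) (number_two : Int) (amount_dividers : Int), Dom_between_some_some_solution number_one number_two amount_dividers → Spec_between_some_some_solution number_one number_two amount_dividers (between_some_some_solution number_one number_two amount_dividers)


-- ===== LEMMAS AND PROOFS =====
theorem pvCollect_fst_mem (i : Int) (d : Int) (hd : 2 ≤ d) (x : Int) :
    x ∈ (pvCollect i d).1 ↔ d ≤ x ∧ x * x ≤ i ∧ x ∣ i := by
  induction d using pvCollect.induct (i := i) with
  | case1 e h hm ih =>
    rw [pvCollect]
    rw [PySem.Int.mod_eq_zero_iff_dvd] at hm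
    simp only [dif_pos h, if_pos ((PySem.Int.mod_eq_zero_iff_dvd i e).mpr hm), List.mem_cons]
    constructor
    · rintro (rfl | hx)
      · exact ⟨le_refl _, h, hm⟩
      · obtain ⟨h1, h2, h3⟩ := (ih (by omega)).1 hx
        exact ⟨by omega, h2, h3⟩
    · rintro ⟨h1, h2, h3⟩
      by_cases hxe : x = e
      · exact Or.inl hxe
      · exact Or.inr ((ih (by omega)).2 ⟨by omega, h2, h3⟩)
  | case2 e h hm ih =>
    rw [pvCollect]
    simp only [dif_pos h, if_neg hm]
    rw [ih (by omega)]
    constructor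
    · rintro ⟨h1, h2, h3⟩; exact ⟨by omega, h2, h3⟩
    · rintro ⟨h1, h2, h3⟩
      refine ⟨?_, h2, h3⟩
      rcases eq_or_lt_of_le h1 with heq | hlt
      · cases heq; exact absurd ((PySem.Int.mod_eq_zero_iff_dvd i _).mpr h3) hm
      · omega
  | case3 e h =>
    rw [pvCollect]
    simp only [dif_neg h, List.not_mem_nil, false_iff]
    rintro ⟨h1, h2, h3⟩
    nlinarith

theorem pvCollect_snd_mem (i : Int) (d : Int) (hd : 2 ≤ d) (y : Int) :
    y ∈ (pvCollect i d).2 ↔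
      ∃ x, d ≤ x ∧ x * x ≤ i ∧ x ∣ i ∧ y = i / x ∧ y ≠ x := by
  induction d using pvCollect.induct (i := i) with
  | case1 e h hm ih =>
    rw [pvCollect]
    have hdvd : e ∣ i := (PySem.Int.mod_eq_zero_iff_dvd i e).mp hm
    have hfd : PySem.Int.floordiv i e = i / e := PySem.Int.floordiv_eq_ediv_of_pos (by omega)
    simp only [dif_pos h, if_pos hm]
    by_cases hq : PySem.Int.floordiv i e ≠ e
    · simp only [if_pos hq, List.mem_cons]
      constructor
      · rintro (rfl | hy)
        · exact ⟨e, le_refl _, h, hdvd, hfd, by rw [hfd] at hq ⊢; exact hq⟩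
        · obtain ⟨x, h1, h2, h3, h4, h5⟩ := (ih (by omega)).1 hy
          exact ⟨x, by omega, h2, h3, h4, h5⟩
      · rintro ⟨x, h1, h2, h3, h4, h5⟩
        by_cases hxe : x = e
        · subst hxe; exact Or.inl (by rw [hfd, h4])
        · exact Or.inr ((ih (by omega)).2 ⟨x, by omega, h2, h3, h4, h5⟩)
    · simp only [if_neg hq]
      rw [ih (by omega)]
      push Not at hq
      constructor
      · rintro ⟨x, h1, h2, h3, h4, h5⟩; exact ⟨x, by omega, h2, h3, h4, h5⟩
      · rintro ⟨x, h1, h2, h3, h4, h5⟩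
        refine ⟨x, ?_, h2, h3, h4, h5⟩
        rcases eq_or_lt_of_le h1 with rfl | hlt
        · rw [hfd] at hq; rw [hq] at h4; exact absurd h4.symm (by exact fun hh => h5 (by omega))
        · omega
  | case2 e h hm ih =>
    rw [pvCollect]
    simp only [dif_pos h, if_neg hm]
    rw [ih (by omega)]
    constructor
    · rintro ⟨x, h1, h2, h3, h4, h5⟩; exact ⟨x, by omega, h2, h3, h4, h5⟩
    · rintro ⟨x, h1, h2, h3, h4, h5⟩
      refine ⟨x, ?_, h2, h3, h4, h5⟩
      rcases eq_or_lt_of_le h1 with heq | hlt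
      · cases heq; exact absurd ((PySem.Int.mod_eq_zero_iff_dvd i _).mpr h3) hm
      · omega
  | case3 e h =>
    rw [pvCollect]
    simp only [dif_neg h, List.not_mem_nil, false_iff]
    rintro ⟨x, h1, h2, h3, h4, h5⟩
    nlinarith

theorem pvCollect_fst_pairwise (i : Int) (d : Int) (hd : 2 ≤ d) :
    (pvCollect i d).1.Pairwise (· < ·) := by
  induction d using pvCollect.induct (i := i) with
  | case1 e h hm ih =>
    rw [pvCollect]
    simp only [dif_pos h, if_pos hm]
    refine List.Pairwise.cons ?_ (ih (by omega))
    intro y hy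
    have := (pvCollect_fst_mem i (e + 1) (by omega) y).1 hy
    omega
  | case2 e h hm ih =>
    rw [pvCollect]; simp only [dif_pos h, if_neg hm]; exact ih (by omega)
  | case3 e h =>
    rw [pvCollect]; simp only [dif_neg h]; exact List.Pairwise.nil

theorem pvCollect_snd_pairwise (i : Int) (d : Int) (hd : 2 ≤ d) :
    (pvCollect i d).2.Pairwise (· > ·) := by
  induction d using pvCollect.induct (i := i) with
  | case1 e h hm ih =>
    rw [pvCollect]
    have hdvd : e ∣ i := (PySem.Int.mod_eq_zero_iff_dvd i e).mp hm
    have hfd : PySem.Int.floordiv i e = i / e := PySem.Int.floordiv_eq_ediv_of_pos (by omega)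
    simp only [dif_pos h, if_pos hm]
    by_cases hq : PySem.Int.floordiv i e ≠ e
    · simp only [if_pos hq]
      refine List.Pairwise.cons ?_ (ih (by omega))
      intro y hy
      obtain ⟨x, h1, h2, h3, h4, h5⟩ := (pvCollect_snd_mem i (e + 1) (by omega) y).1 hy
      -- q = i / e > y = i / x with e < x
      have hipos : 0 < i := by nlinarith
      have hqe : (i / e) * e = i := Int.ediv_mul_cancel hdvd
      have hyx : y * x = i := by rw [h4]; exact Int.ediv_mul_cancel h3
      have hypos : 0 < y := by nlinarith
      have hqpos : 0 < i / e := by nlinarith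
      rw [hfd]
      nlinarith
    · simp only [if_neg hq]; exact ih (by omega)
  | case2 e h hm ih =>
    rw [pvCollect]; simp only [dif_pos h, if_neg hm]; exact ih (by omega)
  | case3 e h =>
    rw [pvCollect]; simp only [dif_neg h]; exact List.Pairwise.nil

def pvF (i : Int) : List Int :=
  (PySem.List.pyRange 2 (PySem.Int.floordiv i 2 + 1) 1).filter (fun j => decide (PySem.Int.mod i j = 0))

theorem pvF_mem (i : Int) (j : Int) :
    j ∈ pvF i ↔ 2 ≤ j ∧ j ≤ PySem.Int.floordiv i 2 ∧ j ∣ i := by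
  simp only [pvF, List.mem_filter, PySem.List.mem_pyRange_one, decide_eq_true_eq,
    PySem.Int.mod_eq_zero_iff_dvd]
  omega

theorem pvF_pairwise (i : Int) : (pvF i).Pairwise (· < ·) :=
  (PySem.List.pairwise_lt_pyRange_one 2 (PySem.Int.floordiv i 2 + 1)).filter _

theorem pvDivs_eq (i : Int) : (pvCollect i 2).1 ++ (pvCollect i 2).2.reverse = pvF i := by
  have hfd : PySem.Int.floordiv i 2 = i / 2 := PySem.Int.floordiv_eq_ediv_of_pos (by omega)
  by_cases hi : 4 ≤ i
  · have hipos : 0 < i := by omega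
    -- both lists are strictly increasing with the same members
    have hpair : ((pvCollect i 2).1 ++ (pvCollect i 2).2.reverse).Pairwise (· < ·) := by
      rw [List.pairwise_append]
      refine ⟨pvCollect_fst_pairwise i 2 le_rfl, ?_, ?_⟩
      · rw [List.pairwise_reverse]
        exact pvCollect_snd_pairwise i 2 le_rfl
      · intro s hs y hy
        obtain ⟨hs1, hs2, hs3⟩ := (pvCollect_fst_mem i 2 le_rfl s).1 hs
        rw [List.mem_reverse] at hy
        obtain ⟨x, h1, h2, h3, h4, h5⟩ := (pvCollect_snd_mem i 2 le_rfl y).1 hy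
        have hyx : y * x = i := by rw [h4]; exact Int.ediv_mul_cancel h3
        have hypos : 0 < y := by nlinarith
        have hygt : x < y := by
          rcases Int.lt_or_le x y with h | h
          · exact h
          · exfalso
            rcases eq_or_lt_of_le h with heq | hlt
            · exact h5 heq
            · nlinarith
        nlinarith
    have hmem : ∀ j, j ∈ (pvCollect i 2).1 ++ (pvCollect i 2).2.reverse ↔ j ∈ pvF i := by
      intro j
      rw [List.mem_append, List.mem_reverse, pvCollect_fst_mem i 2 le_rfl,
        pvCollect_snd_mem i 2 le_rfl, pvF_mem, hfd]
      constructor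
      · rintro (⟨h1, h2, h3⟩ | ⟨x, h1, h2, h3, h4, h5⟩)
        · refine ⟨h1, ?_, h3⟩
          rw [Int.le_ediv_iff_mul_le (by omega)]
          nlinarith
        · have hjx : j * x = i := by rw [h4]; exact Int.ediv_mul_cancel h3
          have hjpos : 0 < j := by nlinarith
          have hjge : x ≤ j := by nlinarith
          refine ⟨by omega, ?_, Dvd.intro x (by linarith [hjx])⟩
          rw [Int.le_ediv_iff_mul_le (by omega)]
          nlinarith
      · rintro ⟨h1, h2, h3⟩
        rw [Int.le_ediv_iff_mul_le (by omega)] at h2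
        by_cases hsq : j * j ≤ i
        · exact Or.inl ⟨h1, hsq, h3⟩
        · right
          obtain ⟨c, hc⟩ := h3
          have hcpos : 0 < c := by nlinarith
          have hcj : c < j := by nlinarith
          have hc2 : 2 ≤ c := by nlinarith
          exact ⟨c, hc2, by nlinarith, Dvd.intro j (by linarith [hc]),
            by rw [hc]; exact (Int.mul_ediv_cancel _ (by omega : c ≠ 0)).symm, by omega⟩
    exact List.Perm.eq_of_pairwise (fun a b _ _ hab hba => absurd hba (by omega))
      hpair (pvF_pairwise i)
      ((List.perm_ext_iff_of_nodup (hpair.imp ne_of_lt) ((pvF_pairwise i).imp ne_of_lt)).2 hmem)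
  · -- i ≤ 3: both sides are empty
    have h1 : pvCollect i 2 = ([], []) := by rw [pvCollect]; simp only [dif_neg (by omega : ¬ (2:Int) * 2 ≤ i)]
    have h2 : PySem.List.pyRange 2 (PySem.Int.floordiv i 2 + 1) 1 = [] := by
      apply PySem.List.pyRange_one_eq_nil
      omega
    rw [h1, pvF, h2]
    simp

theorem pvInnerA_eq (i amount : Int) (j : Int) (a : List Int) :
    pvInnerA i amount j a =
      a ++ ((PySem.List.pyRange j (PySem.Int.floordiv i 2 + 1) 1).filter
        (fun k => decide (PySem.Int.mod i k = 0))).take ((amount + 1 - a.length).toNat) := by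
  induction j, a using pvInnerA.induct (i := i) (amount := amount) with
  | case1 j a hj hc ih =>
    obtain ⟨hm, hl⟩ := hc
    rw [pvInnerA, dif_pos hj, if_pos ⟨hm, hl⟩, ih, PySem.List.pyRange_one_cons hj]
    have hn : (amount + 1 - (a.length : Int)).toNat
        = (amount + 1 - ((a.length : Int) + 1)).toNat + 1 := by omega
    simp [hm, hn, List.append_assoc]
  | case2 j a hj hc hbr =>
    rw [pvInnerA, dif_pos hj, if_neg hc, if_pos hbr]
    have hn : (amount + 1 - (a.length : Int)).toNat = 0 := by omega
    simp [hn]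
  | case3 j a hj hc hbr ih =>
    rw [pvInnerA, dif_pos hj, if_neg hc, if_neg hbr, ih, PySem.List.pyRange_one_cons hj]
    have hm : ¬ PySem.Int.mod i j = 0 := by
      intro hmod; exact hc ⟨hmod, by omega⟩
    simp [hm]
  | case4 j a hj =>
    rw [pvInnerA, dif_neg hj, PySem.List.pyRange_one_eq_nil (by omega)]
    simp

theorem pvStep_eq (amount : Int) (acc : List (List Int)) (i : Int) :
    (if ((pvInnerA i amount 2 []).length : Int) = amount
      then acc ++ [pvInnerA i amount 2 []] else acc)
    = (if (((pvCollect i 2).1 ++ (pvCollect i 2).2.reverse).length : Int) = amount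
      then acc ++ [(pvCollect i 2).1 ++ (pvCollect i 2).2.reverse] else acc) := by
  rw [pvInnerA_eq, pvDivs_eq]
  unfold pvF
  simp only [List.nil_append, List.length_nil, Nat.cast_zero, sub_zero, List.length_take]
  set F := (PySem.List.pyRange 2 (PySem.Int.floordiv i 2 + 1) 1).filter
    (fun j => decide (PySem.Int.mod i j = 0)) with hF
  by_cases hC : (F.length : Int) = amount
  · have htk : F.take ((amount + 1).toNat) = F := List.take_of_length_le (by omega)
    rw [htk, if_pos (by omega), if_pos hC]
  · rw [if_neg (by omega), if_neg hC]


-- ===== VERDICT (by name: the statement is the Claim_ definition above) =====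
theorem between_some_some_solution_spec : Claim_equal_between_some_some_solution := by
  intro n1 n2 amount _
  unfold Spec_between_some_some_solution
  unfold between_some_some_solution between_some_some_solution_alt
  simp only []
  by_cases hneg : amount < 0
  · rw [if_pos hneg]
    have hz : (PySem.List.pyRange n1 (n2 + 1) 1).foldl
        (fun answer i => if ((pvInnerA i amount 2 []).length : Int) = amount
          then answer ++ [pvInnerA i amount 2 []] else answer) ([] : List (List Int)) = [] := by
      rw [PySem.List.foldl_congr_mem (g := fun acc _ => acc)]
      · exact List.foldl_fixed _
      · intro acc x _
        rw [if_neg (by omega)]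
    rw [hz]
    simp
  · rw [if_neg hneg]
    rw [PySem.List.foldl_congr_mem (g := fun acc i =>
      (if (((pvCollect i 2).1 ++ (pvCollect i 2).2.reverse).length : Int) = amount
        then acc ++ [(pvCollect i 2).1 ++ (pvCollect i 2).2.reverse] else acc))]
    intro acc x _
    exact pvStep_eq amount acc x
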